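-- pv_equiv track=rewrite | github.com/luongphambao/coding | codelearn/maxAbssum.py | maxAbsSum
-- ===== SOURCE A (Python) =====
-- def maxAbsSum(arr):
--     s=0
--     arr.sort()
--     item=[]
--     for i in range(len(arr)//2):
--         item.append(arr[i])
--         item.append(arr[len(arr)-1-i])
--     if len(arr)%2!=0:item.append(arr[len(arr)//2])
--     item.append(item[0])
--     for j in range(1,len(item)):
--         s+=(abs(item[j]-item[j-1]))
--     return s
-- ===== SOURCE B (Python) =====
-- def maxAbsSum(arr):
--     # Closed form: with the list sorted, the zigzag circular arrangement's
--     # abs-diff sum is 2*(sum of top n//2 elements - sum of bottom n//2 elements).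
--     # Like A, this sorts arr in place (caller-visible mutation).
--     arr.sort()
--     k = len(arr) // 2
--     return 2 * (sum(arr[len(arr) - k:]) - sum(arr[:k]))
-- ===== Notes on version B (the rewrite author's own statement) =====
-- stated objective: simpler
-- what changed: Replaces building the zigzag arrangement and summing its circular absolute differences with the closed form 2*(sum of top half - sum of bottom half) of the sorted list.
import Mathlib
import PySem

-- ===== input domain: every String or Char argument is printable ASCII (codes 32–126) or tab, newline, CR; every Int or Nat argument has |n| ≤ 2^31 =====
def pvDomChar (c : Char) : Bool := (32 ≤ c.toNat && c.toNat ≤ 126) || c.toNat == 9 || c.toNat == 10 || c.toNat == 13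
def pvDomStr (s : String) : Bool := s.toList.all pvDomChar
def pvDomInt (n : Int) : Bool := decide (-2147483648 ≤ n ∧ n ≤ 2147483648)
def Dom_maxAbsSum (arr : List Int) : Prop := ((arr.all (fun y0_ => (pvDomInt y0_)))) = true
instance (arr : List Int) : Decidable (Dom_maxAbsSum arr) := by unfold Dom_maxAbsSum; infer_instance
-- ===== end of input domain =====

-- B replaces A's zigzag construction + circular abs-diff summation by the closed form
-- 2*(sum of top n//2 - sum of bottom n//2) of the sorted list (simpler: one sort and two slice sums).
-- Like A, the Python B sorts arr in place; the equivalence proved here is about the return value.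

-- ===== PORT A =====
def maxAbsSum (arr : List Int) : Int :=
  let t := PySem.List.sorted arr (fun x => x)
  let n : Int := (t.length : Int)
  let item0 : List Int :=
    (PySem.List.pyRange 0 (PySem.Int.floordiv n 2) 1).foldl
      (fun it i => (it ++ [PySem.List.pyGetD t i 0]) ++ [PySem.List.pyGetD t (n - 1 - i) 0]) []
  let item1 : List Int :=
    if PySem.Int.mod n 2 ≠ 0 then item0 ++ [PySem.List.pyGetD t (PySem.Int.floordiv n 2) 0] else item0
  let item : List Int := item1 ++ [PySem.List.pyGetD item1 0 0]
  (PySem.List.pyRange 1 ((item.length : Int)) 1).foldl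
    (fun s j => s + |PySem.List.pyGetD item j 0 - PySem.List.pyGetD item (j - 1) 0|) 0

-- ===== PORT B =====
def maxAbsSum_alt (arr : List Int) : Int :=
  let t := PySem.List.sorted arr (fun x => x)
  let n : Int := (t.length : Int)
  let k : Int := PySem.Int.floordiv n 2
  2 * ((PySem.List.slice t (some (n - k)) none).sum - (PySem.List.slice t none (some k)).sum)

-- ===== PRECONDITION & SPEC =====
-- Pre_ excludes only the empty list, on which A raises IndexError (item[0] of an empty list).
def Pre_maxAbsSum (arr : List Int) : Prop := arr ≠ []
instance (arr : List Int) : Decidable (Pre_maxAbsSum arr) := by unfold Pre_maxAbsSum; infer_instance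
def pvWitness_maxAbsSum : List Int := [1, 2, 3]

def Spec_maxAbsSum (arr : List Int) (out : Int) : Prop := out = maxAbsSum_alt arr
instance (arr : List Int) (out : Int) : Decidable (Spec_maxAbsSum arr out) := by unfold Spec_maxAbsSum; infer_instance

-- ===== CLAIM (what is proved, stated in full; the proofs are below) =====
def Claim_equal_maxAbsSum : Prop := ∀ (arr : List Int), Dom_maxAbsSum arr → Pre_maxAbsSum arr → Spec_maxAbsSum arr (maxAbsSum arr)

-- ===== LEMMAS AND PROOFS =====

-- path sum: sum of absolute differences of adjacent elements
def pvPath : List Int → Int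
  | [] => 0
  | [_] => 0
  | x :: y :: r => |y - x| + pvPath (y :: r)

-- the zigzag prefix A builds: t[0], t[N-1], t[1], t[N-2], …
def pvZig (t : List Int) (N K : Nat) : List Int :=
  (List.range K).flatMap (fun j => [t.getD j 0, t.getD (N - 1 - j) 0])

def pvLo (t : List Int) (K : Nat) : Int := ((List.range K).map (fun j => t.getD j 0)).sum
def pvHi (t : List Int) (N K : Nat) : Int := ((List.range K).map (fun j => t.getD (N - 1 - j) 0)).sum

theorem pvPath_append_singleton (l : List Int) (h : l ≠ []) (x : Int) :
    pvPath (l ++ [x]) = pvPath l + |x - l.getLast?.getD 0| := by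
  induction l with
  | nil => exact absurd rfl h
  | cons a r ih =>
    cases r with
    | nil => simp [pvPath]
    | cons b r' =>
      have hne : (b :: r') ≠ [] := by simp
      have := ih hne
      simp only [List.cons_append, pvPath] at this ⊢
      rw [this, List.getLast?_cons_cons]
      ring

theorem pvSum_diffs (l : List Int) :
    ((List.range (l.length - 1)).map (fun k => |l.getD (k + 1) 0 - l.getD k 0|)).sum = pvPath l := by
  induction l with
  | nil => simp [pvPath]
  | cons a l' ih =>
    cases l' with
    | nil => simp [pvPath]
    | cons b r =>
      rw [show (a :: b :: r).length - 1 = ((b :: r).length - 1) + 1 by simp,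
        List.range_succ_eq_map]
      simp only [List.map_cons, List.map_map, List.sum_cons, pvPath, ← ih,
        Function.comp_def, Nat.succ_eq_add_one, List.getD_cons_succ, List.getD_cons_zero]

theorem pvLoop2_eq (l : List Int) :
    (PySem.List.pyRange 1 ((l.length : Int)) 1).foldl
      (fun s j => s + |PySem.List.pyGetD l j 0 - PySem.List.pyGetD l (j - 1) 0|) 0 = pvPath l := by
  rw [PySem.List.pyRange_one, List.foldl_map, PySem.List.foldl_add]
  rw [show (((l.length : Int)) - 1).toNat = l.length - 1 by omega]
  rw [zero_add, ← pvSum_diffs]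
  refine congrArg List.sum (List.map_congr_left fun k _ => ?_)
  have h1 : (1 : Int) + (k : Int) = (((k + 1 : Nat)) : Int) := by push_cast; ring
  rw [h1, PySem.List.pyGetD_natCast]
  have h2 : (((k + 1 : Nat)) : Int) - 1 = ((k : Nat) : Int) := by push_cast; ring
  rw [h2, PySem.List.pyGetD_natCast]

theorem pvBuild_aux (t : List Int) (K : Nat) (hK : 2 * K ≤ t.length) :
    (List.range K).foldl
      (fun it j => (it ++ [PySem.List.pyGetD t ((j : Nat) : Int) 0]) ++
        [PySem.List.pyGetD t ((t.length : Int) - 1 - ((j : Nat) : Int)) 0]) []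
      = pvZig t t.length K := by
  induction K with
  | zero => simp [pvZig]
  | succ K' ih =>
    rw [List.range_succ, List.foldl_append, ih (by omega)]
    simp only [List.foldl_cons, List.foldl_nil]
    rw [show ((t.length : Int) - 1 - ((K' : Nat) : Int)) = ((t.length - 1 - K' : Nat) : Int) by omega]
    rw [PySem.List.pyGetD_natCast, PySem.List.pyGetD_natCast]
    simp [pvZig, List.range_succ]

theorem pvZig_ne_nil (t : List Int) (N K : Nat) (hK : 1 ≤ K) : pvZig t N K ≠ [] := by
  obtain ⟨K', rfl⟩ : ∃ K', K = K' + 1 := ⟨K - 1, by omega⟩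
  simp [pvZig, List.range_succ]

theorem pvZig_head (t : List Int) (N K : Nat) (hK : 1 ≤ K) :
    (pvZig t N K).getD 0 0 = t.getD 0 0 := by
  obtain ⟨K', rfl⟩ : ∃ K', K = K' + 1 := ⟨K - 1, by omega⟩
  simp [pvZig, List.range_succ_eq_map]

theorem pvZig_getLast? (t : List Int) (N K : Nat) (hK : 1 ≤ K) :
    (pvZig t N K).getLast? = some (t.getD (N - K) 0) := by
  obtain ⟨K', rfl⟩ : ∃ K', K = K' + 1 := ⟨K - 1, by omega⟩
  rw [show pvZig t N (K' + 1) = (pvZig t N K' ++ [t.getD K' 0]) ++ [t.getD (N - 1 - K') 0] by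
    simp [pvZig, List.range_succ]]
  rw [List.getLast?_concat]
  simp [show N - 1 - K' = N - (K' + 1) by omega]

theorem pvPath_pvZig (t : List Int)
    (mono : ∀ p q : Nat, p ≤ q → q < t.length → t.getD p 0 ≤ t.getD q 0)
    (K : Nat) (hK1 : 1 ≤ K) (hK : 2 * K ≤ t.length) :
    pvPath (pvZig t t.length K)
      = 2 * (pvHi t t.length K - pvLo t K) + t.getD 0 0 - t.getD (t.length - K) 0 := by
  induction K, hK1 using Nat.le_induction with
  | base =>
    have hm := mono 0 (t.length - 1) (by omega) (by omega)
    simp only [pvZig, pvHi, pvLo, List.range_one, List.flatMap_cons, List.flatMap_nil,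
      List.append_nil, List.map_cons, List.map_nil, List.sum_cons, List.sum_nil,
      Nat.sub_zero, pvPath]
    rw [abs_of_nonneg (by omega)]
    ring
  | succ K' hK1' ih =>
    have hzig : pvZig t t.length (K' + 1)
        = (pvZig t t.length K' ++ [t.getD K' 0]) ++ [t.getD (t.length - 1 - K') 0] := by
      simp [pvZig, List.range_succ]
    have hne1 : pvZig t t.length K' ≠ [] := pvZig_ne_nil t _ K' hK1'
    rw [hzig, pvPath_append_singleton _ (by simp) _, pvPath_append_singleton _ hne1 _,
      List.getLast?_concat, pvZig_getLast? t _ K' hK1']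
    simp only [Option.getD_some]
    rw [ih (by omega)]
    have m1 : t.getD K' 0 ≤ t.getD (t.length - K') 0 := mono K' (t.length - K') (by omega) (by omega)
    have m2 : t.getD K' 0 ≤ t.getD (t.length - 1 - K') 0 :=
      mono K' (t.length - 1 - K') (by omega) (by omega)
    rw [abs_of_nonpos (by omega), abs_of_nonneg (by omega)]
    rw [show t.length - (K' + 1) = t.length - 1 - K' by omega]
    simp only [pvHi, pvLo, List.range_succ, List.map_append, List.map_cons, List.map_nil,
      List.sum_append, List.sum_cons, List.sum_nil]
    ring

theorem pvLo_eq (t : List Int) (K : Nat) (hK : K ≤ t.length) :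
    pvLo t K = (t.take K).sum := by
  induction K with
  | zero => simp [pvLo]
  | succ K' ih =>
    rw [List.take_succ, List.sum_append]
    rw [← ih (by omega)]
    simp [pvLo, List.range_succ, List.getElem?_eq_getElem (show K' < t.length by omega)]

theorem pvHi_eq (t : List Int) (K : Nat) (hK : K ≤ t.length) :
    pvHi t t.length K = (t.drop (t.length - K)).sum := by
  induction K with
  | zero => simp [pvHi]
  | succ K' ih =>
    have h1 : t.length - (K' + 1) < t.length := by omega
    rw [show t.length - (K' + 1) = t.length - K' - 1 by omega,
      List.drop_eq_getElem_cons (by omega : t.length - K' - 1 < t.length), List.sum_cons]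
    rw [show t.length - K' - 1 + 1 = t.length - K' by omega, ← ih (by omega)]
    rw [← List.getD_eq_getElem t 0 (show t.length - K' - 1 < t.length by omega),
      show t.length - K' - 1 = t.length - 1 - K' by omega]
    simp only [pvHi, List.range_succ, List.map_append, List.map_cons, List.map_nil,
      List.sum_append, List.sum_cons, List.sum_nil]
    ring

-- ===== VERDICT (by name: the statement is the Claim_ definition above) =====
theorem maxAbsSum_spec : Claim_equal_maxAbsSum := by
  intro arr _ hpre
  unfold Spec_maxAbsSum maxAbsSum maxAbsSum_alt
  simp only []
  set t := PySem.List.sorted arr (fun x => x) with ht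
  have htne : t ≠ [] := by rw [ht, Ne, PySem.List.sorted_eq_nil_iff]; exact hpre
  have hN1 : 1 ≤ t.length := List.length_pos_iff.mpr htne
  have mono : ∀ p q : Nat, p ≤ q → q < t.length → t.getD p 0 ≤ t.getD q 0 := by
    intro p q hpq hq
    rw [List.getD_eq_getElem t 0 (lt_of_le_of_lt hpq hq), List.getD_eq_getElem t 0 hq]
    exact PySem.List.sorted_id_getElem_mono arr hpq hq
  set N := t.length with hNdef
  have hfd : PySem.Int.floordiv (N : Int) 2 = ((N / 2 : Nat) : Int) := by
    exact_mod_cast PySem.Int.floordiv_natCast N 2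
  have hmod : PySem.Int.mod (N : Int) 2 = ((N % 2 : Nat) : Int) := by
    exact_mod_cast PySem.Int.mod_natCast N 2
  set K := N / 2 with hKdef
  have hKN : 2 * K ≤ N := by omega
  have hbuild : (PySem.List.pyRange 0 (PySem.Int.floordiv (N : Int) 2) 1).foldl
      (fun it i => (it ++ [PySem.List.pyGetD t i 0]) ++
        [PySem.List.pyGetD t ((N : Int) - 1 - i) 0]) []
      = pvZig t N K := by
    rw [hfd, PySem.List.pyRange_zero_nat, List.foldl_map]
    exact pvBuild_aux t K hKN
  have hslice : 2 * ((PySem.List.slice t (some ((N : Int) - PySem.Int.floordiv (N : Int) 2)) none).sum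
        - (PySem.List.slice t none (some (PySem.Int.floordiv (N : Int) 2))).sum)
      = 2 * (pvHi t N K - pvLo t K) := by
    rw [hfd, show (N : Int) - ((K : Nat) : Int) = ((N - K : Nat) : Int) by omega,
      PySem.List.slice_from_natCast, PySem.List.slice_to_natCast,
      ← pvHi_eq t K (by omega), ← pvLo_eq t K (by omega)]
  rw [hbuild, hslice]
  by_cases hpar : N % 2 = 0
  · -- even length: no middle element
    have hK1 : 1 ≤ K := by omega
    rw [if_neg (by rw [hmod]; simp [hpar])]
    rw [PySem.List.pyGetD_zero, pvZig_head t N K hK1, pvLoop2_eq,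
      pvPath_append_singleton _ (pvZig_ne_nil t N K hK1) _, pvZig_getLast? t N K hK1]
    simp only [Option.getD_some]
    have hpz := pvPath_pvZig t mono K hK1 hKN
    rw [← hNdef] at hpz
    rw [hpz]
    have m0 : t.getD 0 0 ≤ t.getD (N - K) 0 := mono 0 (N - K) (by omega) (by omega)
    rw [abs_of_nonpos (by omega)]
    ring
  · -- odd length: middle element appended
    rw [if_pos (by rw [hmod]; omega)]
    rw [hfd, PySem.List.pyGetD_natCast]
    by_cases hK1 : 1 ≤ K
    · have hhead : (pvZig t N K ++ [t.getD K 0]).getD 0 0 = t.getD 0 0 := by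
        rw [List.getD_append _ _ _ _ (by
          have := pvZig_ne_nil t N K hK1
          exact List.length_pos_iff.mpr this)]
        exact pvZig_head t N K hK1
      rw [PySem.List.pyGetD_zero, hhead, pvLoop2_eq,
        pvPath_append_singleton _ (by simp) _, List.getLast?_concat,
        pvPath_append_singleton _ (pvZig_ne_nil t N K hK1) _, pvZig_getLast? t N K hK1]
      simp only [Option.getD_some]
      have hpz := pvPath_pvZig t mono K hK1 hKN
      rw [← hNdef] at hpz
      rw [hpz]
      have m1 : t.getD K 0 ≤ t.getD (N - K) 0 := mono K (N - K) (by omega) (by omega)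
      have m2 : t.getD 0 0 ≤ t.getD K 0 := mono 0 K (by omega) (by omega)
      rw [abs_of_nonpos (show t.getD 0 0 - t.getD K 0 ≤ 0 by omega),
        abs_of_nonpos (show t.getD K 0 - t.getD (N - K) 0 ≤ 0 by omega)]
      ring
    · -- K = 0, so N = 1: a single element
      have hK0 : K = 0 := by omega
      have ht1 : t.length = 1 := by omega
      obtain ⟨x, hx⟩ := List.length_eq_one_iff.mp ht1
      rw [hK0]
      simp [pvZig, pvLo, pvHi, hx, PySem.List.pyGetD,
        PySem.List.pyRange_one, PySem.List.pyIdx?, PySem.List.pyGet?]
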